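-- pv_equiv track=rewrite | github.com/Inco9001/usacotraining | bronzeTraining/nonTransitiveDice/dice.py | diceSetUp
-- ===== SOURCE A (Python) =====
-- def diceSetUp(a,b):
--     aWins = 0
--     bWins = 0
--     for t in a:
--         for x in b:
--             if t > x:
--                 aWins += 1
--             if x > t:
--                 bWins += 1
--     if bWins > aWins:
--
--         return False
--     return True
-- ===== SOURCE B (Python) =====
-- def _bisect_left(xs, x):
--     lo, hi = 0, len(xs)
--     while lo < hi:
--         mid = (lo + hi) // 2
--         if xs[mid] < x:
--             lo = mid + 1
--         else:
--             hi = mid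
--     return lo
--
--
-- def _bisect_right(xs, x):
--     lo, hi = 0, len(xs)
--     while lo < hi:
--         mid = (lo + hi) // 2
--         if xs[mid] <= x:
--             lo = mid + 1
--         else:
--             hi = mid
--     return lo
--
--
-- def diceSetUp(a, b):
--     sb = sorted(b)
--     m = len(sb)
--     aWins = 0
--     bWins = 0
--     for t in a:
--         aWins += _bisect_left(sb, t)      # faces of b strictly below t
--         bWins += m - _bisect_right(sb, t) # faces of b strictly above t
--     return aWins >= bWins
-- ===== Notes on version B (the rewrite author's own statement) =====
-- stated objective: faster
-- what changed: Replaces the nested all-pairs comparison loop by sorting b once and binary-searching (bisect) per element of a to count smaller/greater faces, then comparing totals.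
import Mathlib
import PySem

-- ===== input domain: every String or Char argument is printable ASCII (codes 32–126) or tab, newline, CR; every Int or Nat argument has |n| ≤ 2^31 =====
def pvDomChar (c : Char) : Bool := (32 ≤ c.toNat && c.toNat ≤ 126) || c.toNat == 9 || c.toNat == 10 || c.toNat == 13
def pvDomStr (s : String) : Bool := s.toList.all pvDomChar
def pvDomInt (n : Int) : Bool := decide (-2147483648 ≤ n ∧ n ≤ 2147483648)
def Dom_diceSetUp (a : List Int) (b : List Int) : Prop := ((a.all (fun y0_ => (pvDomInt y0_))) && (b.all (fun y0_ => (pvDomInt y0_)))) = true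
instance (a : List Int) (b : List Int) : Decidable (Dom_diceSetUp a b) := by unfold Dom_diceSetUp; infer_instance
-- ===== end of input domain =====

-- B sorts b once and binary-searches per element of a instead of A's nested all-pairs loop; return values proved equal.

-- ===== PORT A =====
-- literal port: nested loops accumulating (aWins, bWins), then `if bWins > aWins`
def diceSetUp (a : List Int) (b : List Int) : Bool :=
  let p := a.foldl (fun (p : Int × Int) t =>
      b.foldl (fun (q : Int × Int) x =>
        (q.1 + (if t > x then 1 else 0), q.2 + (if x > t then 1 else 0))) p) (0, 0)
  if p.2 > p.1 then false else true

-- ===== PORT B =====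
-- sorted(b) → PySem.List.sorted; the hand-written bisect helpers of Source B are the
-- standard lo/hi binary-search loops, ported as PySem.List.bisectLeft / bisectRight
-- (the same lo/hi binary-search loop).
def diceSetUp_alt (a : List Int) (b : List Int) : Bool :=
  let sb := PySem.List.sorted b (fun x => x)
  let m : Int := sb.length
  let p := a.foldl (fun (p : Int × Int) t =>
      (p.1 + (PySem.List.bisectLeft sb t : Int),
       p.2 + (m - (PySem.List.bisectRight sb t : Int)))) (0, 0)
  decide (p.1 ≥ p.2)

-- ===== PRECONDITION & SPEC =====
def Spec_diceSetUp (a : List Int) (b : List Int) (out : Bool) : Prop := out = diceSetUp_alt a b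
instance (a : List Int) (b : List Int) (out : Bool) : Decidable (Spec_diceSetUp a b out) := by unfold Spec_diceSetUp; infer_instance

-- ===== CLAIM (what is proved, stated in full; the proofs are below) =====
def Claim_equal_diceSetUp : Prop := ∀ (a : List Int) (b : List Int), Dom_diceSetUp a b → Spec_diceSetUp a b (diceSetUp a b)

-- ===== LEMMAS AND PROOFS =====

-- A's inner loop over b adds the counts of faces below / above t.
theorem innerA (b : List Int) (t : Int) (p : Int × Int) :
    b.foldl (fun (q : Int × Int) x =>
        (q.1 + (if t > x then 1 else 0), q.2 + (if x > t then 1 else 0))) p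
      = (p.1 + (b.countP (fun x => decide (x < t)) : Int),
         p.2 + (b.countP (fun x => decide (t < x)) : Int)) := by
  induction b generalizing p with
  | nil => simp
  | cons x xs ih =>
      simp only [List.foldl_cons, List.countP_cons, ih]
      by_cases h1 : x < t <;> by_cases h2 : t < x <;>
        simp [gt_iff_lt, h1, h2, Prod.mk.injEq] <;> omega

-- a fold adding f t to the first and g t to the second component sums the maps
theorem outerB (f g : Int → Int) (a : List Int) (p : Int × Int) :
    a.foldl (fun (p : Int × Int) t => (p.1 + f t, p.2 + g t)) p
      = (p.1 + (a.map f).sum, p.2 + (a.map g).sum) := by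
  induction a generalizing p with
  | nil => simp
  | cons t ts ih =>
      simp only [List.foldl_cons, List.map_cons, List.sum_cons, ih]
      simp only [Prod.mk.injEq]
      constructor <;> ring

-- a list whose first k elements satisfy a predicate and whose rest don't has countP = k
theorem countP_eq_of_split (xs : List Int) (p : Int → Bool) (k : Nat)
    (hk : k ≤ xs.length)
    (h1 : ∀ (j : Nat) (hj : j < xs.length), j < k → p xs[j])
    (h2 : ∀ (j : Nat) (hj : j < xs.length), k ≤ j → ¬ p xs[j]) :
    xs.countP p = k := by
  have hsplit : xs = xs.take k ++ xs.drop k := (List.take_append_drop k xs).symm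
  rw [hsplit, List.countP_append]
  have hlen : (xs.take k).length = k := by simp [hk]
  have c1 : (xs.take k).countP p = (xs.take k).length := by
    rw [List.countP_eq_length]
    intro x hx
    obtain ⟨j, hj, rfl⟩ := List.getElem_of_mem hx
    rw [List.getElem_take]
    exact h1 _ _ (by omega)
  have c2 : (xs.drop k).countP p = 0 := by
    rw [List.countP_eq_zero]
    intro x hx
    obtain ⟨j, hj, rfl⟩ := List.getElem_of_mem hx
    rw [List.getElem_drop]
    exact h2 _ (by simp at hj ⊢; omega) (by omega)
  omega

theorem bisectLeft_eq_countP (xs : List Int) (t : Int)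
    (hs : List.Pairwise (fun x1 x2 => x1 ≤ x2) xs) :
    PySem.List.bisectLeft xs t = xs.countP (fun x => decide (x < t)) := by
  obtain ⟨hle, h1, h2⟩ := PySem.List.bisectLeft_spec xs t hs
  exact (countP_eq_of_split xs _ _ hle
    (fun j hj hjk => by simpa using h1 j hj hjk)
    (fun j hj hkj => by simpa using not_lt.mpr (h2 j hj hkj))).symm

theorem bisectRight_eq_countP (xs : List Int) (t : Int)
    (hs : List.Pairwise (fun x1 x2 => x1 ≤ x2) xs) :
    PySem.List.bisectRight xs t = xs.countP (fun x => decide (x ≤ t)) := by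
  obtain ⟨hle, h1, h2⟩ := PySem.List.bisectRight_spec xs t hs
  exact (countP_eq_of_split xs _ _ hle
    (fun j hj hjk => by simpa using h1 j hj hjk)
    (fun j hj hkj => by simpa using not_le.mpr (h2 j hj hkj))).symm

theorem countP_le_add_gt (xs : List Int) (t : Int) :
    xs.countP (fun x => decide (x ≤ t)) + xs.countP (fun x => decide (t < x)) = xs.length := by
  induction xs with
  | nil => simp
  | cons x l ih =>
      simp only [List.countP_cons, List.length_cons]
      by_cases h : x ≤ t
      · have h2 : ¬ t < x := not_lt.mpr h
        simp [h, h2]; omega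
      · have h2 : t < x := not_le.mp h
        simp [h, h2]; omega

-- ===== VERDICT (by name: the statement is the Claim_ definition above) =====
theorem diceSetUp_spec : Claim_equal_diceSetUp := by
  unfold Claim_equal_diceSetUp
  intro a b _
  unfold Spec_diceSetUp diceSetUp diceSetUp_alt
  simp only [innerA, outerB, zero_add]
  set sb := PySem.List.sorted b (fun x => x) with hsb
  have hperm : sb.Perm b := PySem.List.sorted_perm b (fun x => x) false
  have hpw : List.Pairwise (fun x1 x2 => x1 ≤ x2) sb :=
    PySem.List.sorted_pairwise b (fun x => x)
  have hmapL : (a.map (fun t => ((PySem.List.bisectLeft sb t : Nat) : Int)))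
      = a.map (fun t => ((b.countP (fun x => decide (x < t))) : Int)) := by
    apply List.map_congr_left
    intro t _
    rw [bisectLeft_eq_countP sb t hpw, hperm.countP_eq]
  have hmapR : (a.map (fun t => ((sb.length : Int) - (PySem.List.bisectRight sb t : Nat))))
      = a.map (fun t => ((b.countP (fun x => decide (t < x))) : Int)) := by
    apply List.map_congr_left
    intro t _
    rw [bisectRight_eq_countP sb t hpw]
    have h := countP_le_add_gt sb t
    have hc1 : sb.countP (fun x => decide (x ≤ t)) = b.countP (fun x => decide (x ≤ t)) :=
      hperm.countP_eq _
    have hc2 : sb.countP (fun x => decide (t < x)) = b.countP (fun x => decide (t < x)) :=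
      hperm.countP_eq _
    have hlen : sb.length = b.length := hperm.length_eq
    omega
  rw [hmapL, hmapR]
  set S1 := (a.map (fun t => ((b.countP (fun x => decide (x < t))) : Int))).sum with hS1
  set S2 := (a.map (fun t => ((b.countP (fun x => decide (t < x))) : Int))).sum with hS2
  by_cases h : S2 ≤ S1
  · rw [if_neg (not_lt.mpr h)]
    exact (decide_eq_true h).symm
  · rw [if_pos (not_le.mp h)]
    exact (decide_eq_false h).symm
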